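-- pv_equiv track=rewrite | github.com/NirEllor/Intro_To_CS | 3/ex3.py | num_of_orthogonal
-- ===== SOURCE A (Python) =====
-- def inner_product(vec_1, vec_2):
--     """ This function calculating the inner product of two vectors """
--     product_sum = 0
--     length_v1 = len(vec_1)
--     length_v2 = len(vec_2)
--     if length_v1 == 0 and length_v2 == 0:
--         return 0
--     if length_v1 != length_v2:
--         return None
--     for i in range(length_v1):
--             product = vec_1[i] * vec_2[i]
--             product_sum += product
--     return product_sum
--
-- def num_of_orthogonal(vectors):
--     """ This functions determines the number of orthogonal pairs, without repeats"""
--     cnt_perpendicular = 0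
--     used_pairs = []
--     for j in range(len(vectors)):
--         for i in range(len(vectors)):
--             pair = [i, j]
--             pair_oppose = pair[::-1]
--             if inner_product(vectors[i], vectors[j]) == 0 and pair not in used_pairs and pair_oppose not in used_pairs:
--                 if i != j:
--                     used_pairs.append(pair)
--                     cnt_perpendicular += 1
--     return cnt_perpendicular
-- ===== SOURCE B (Python) =====
-- def num_of_orthogonal(vectors):
--     """Count orthogonal pairs without repeats: one i<j scan, no used_pairs list."""
--     cnt = 0
--     n = len(vectors)
--     for i in range(n):
--         vi = vectors[i]
--         for j in range(i + 1, n):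
--             vj = vectors[j]
--             if len(vi) == len(vj):
--                 s = 0
--                 for x, y in zip(vi, vj):
--                     s += x * y
--                 if s == 0:
--                     cnt += 1
--     return cnt
-- ===== Notes on version B (the rewrite author's own statement) =====
-- stated objective: alternative
-- what changed: Replace the double full-range scan that maintains and searches a growing used_pairs list by a single i<j scan that counts zero inner products directly, dropping used_pairs entirely.
import Mathlib
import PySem

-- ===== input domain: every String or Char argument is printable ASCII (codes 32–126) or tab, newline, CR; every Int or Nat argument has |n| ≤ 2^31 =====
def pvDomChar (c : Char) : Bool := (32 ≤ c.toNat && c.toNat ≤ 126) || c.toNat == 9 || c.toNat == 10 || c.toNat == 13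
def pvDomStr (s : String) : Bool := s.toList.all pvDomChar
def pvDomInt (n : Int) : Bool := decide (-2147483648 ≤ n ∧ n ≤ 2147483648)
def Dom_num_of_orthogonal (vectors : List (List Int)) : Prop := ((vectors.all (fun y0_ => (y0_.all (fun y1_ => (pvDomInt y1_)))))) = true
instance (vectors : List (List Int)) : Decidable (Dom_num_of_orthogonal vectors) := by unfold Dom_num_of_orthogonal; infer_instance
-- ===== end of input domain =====

-- B drops A's used_pairs bookkeeping: one i<j scan counting zero inner products directly.


-- ===== PORT A =====
def inner_product (vec_1 vec_2 : List Int) : Option Int :=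
  let product_sum : Int := 0
  let length_v1 := vec_1.length
  let length_v2 := vec_2.length
  if length_v1 = 0 ∧ length_v2 = 0 then some 0
  else if length_v1 ≠ length_v2 then none
  else some ((PySem.List.pyRange 0 (length_v1 : Int)).foldl
      (fun s i => s + PySem.List.pyGetD vec_1 i 0 * PySem.List.pyGetD vec_2 i 0) product_sum)

-- body of A's inner loop (state = (cnt_perpendicular, used_pairs))
def innerStep (vectors : List (List Int)) (j : Int) (st : Int × List (List Int)) (i : Int) :
    Int × List (List Int) :=
  let pair : List Int := [i, j]
  let pair_oppose : List Int := (PySem.List.slice? pair none none (-1)).getD []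
  if inner_product (PySem.List.pyGetD vectors i []) (PySem.List.pyGetD vectors j []) = some 0
      ∧ pair ∉ st.2 ∧ pair_oppose ∉ st.2 then
    (if i ≠ j then (st.1 + 1, st.2 ++ [pair]) else st)
  else st

def num_of_orthogonal (vectors : List (List Int)) : Int :=
  ((PySem.List.pyRange 0 (vectors.length : Int)).foldl
    (fun st j => (PySem.List.pyRange 0 (vectors.length : Int)).foldl
      (fun st i => innerStep vectors j st i) st)
    (0, ([] : List (List Int)))).1

-- ===== PORT B =====
def dotSum (vi vj : List Int) : Int := (vi.zip vj).foldl (fun s p => s + p.1 * p.2) 0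

def num_of_orthogonal_alt (vectors : List (List Int)) : Int :=
  (PySem.List.pyRange 0 (vectors.length : Int)).foldl (fun cnt i =>
    let vi := PySem.List.pyGetD vectors i []
    (PySem.List.pyRange (i + 1) (vectors.length : Int)).foldl (fun cnt j =>
      let vj := PySem.List.pyGetD vectors j []
      if vi.length = vj.length ∧ dotSum vi vj = 0 then cnt + 1 else cnt) cnt) 0

-- ===== PRECONDITION & SPEC =====
def Spec_num_of_orthogonal (vectors : List (List Int)) (out : Int) : Prop := out = num_of_orthogonal_alt vectors
instance (vectors : List (List Int)) (out : Int) : Decidable (Spec_num_of_orthogonal vectors out) := by unfold Spec_num_of_orthogonal; infer_instance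

-- ===== CLAIM (what is proved, stated in full; the proofs are below) =====
def Claim_equal_num_of_orthogonal : Prop := ∀ (vectors : List (List Int)), Dom_num_of_orthogonal vectors → Spec_num_of_orthogonal vectors (num_of_orthogonal vectors)

-- ===== LEMMAS AND PROOFS =====

-- the orthogonality test, on Nat indices
def orthP (vs : List (List Int)) (a b : Nat) : Bool :=
  ((vs.getD a []).length == (vs.getD b []).length) && (dotSum (vs.getD a []) (vs.getD b []) == 0)

-- pairs appended during outer round j after the first k inner steps
def extraTo (vs : List (List Int)) (j k : Nat) : List (List Int) :=
  ((List.range k).filter (fun y => decide (j < y) && orthP vs j y)).map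
    (fun (y : Nat) => ([(y : Int), (j : Int)] : List Int))

-- used_pairs after the first j full outer rounds
def usedTo (vs : List (List Int)) : Nat → List (List Int)
  | 0 => []
  | j + 1 => usedTo vs j ++ extraTo vs j vs.length

lemma dotSum_comm (u v : List Int) : dotSum u v = dotSum v u := by
  simp only [dotSum, PySem.List.foldl_add, zero_add]
  conv_rhs => rw [← List.zip_swap u v, List.map_map]
  congr 1
  apply List.map_congr_left
  intro p _
  simp only [Function.comp_apply, Prod.fst_swap, Prod.snd_swap]
  ring

lemma dotSum_eq_rangeSum (u v : List Int) (h : u.length = v.length) :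
    ((List.range u.length).map (fun i => u.getD i 0 * v.getD i 0)).sum
      = dotSum u v := by
  simp only [dotSum, PySem.List.foldl_add, zero_add]
  congr 1
  apply List.ext_getElem
  · simp [h]
  · intro i h1 h2
    have hi : i < u.length := by simpa using h1
    have hiv : i < v.length := by omega
    simp [List.getElem_zip, hi, hiv]

lemma ip_iff (u v : List Int) :
    inner_product u v = some 0 ↔ (u.length = v.length ∧ dotSum u v = 0) := by
  unfold inner_product
  by_cases h0 : u.length = 0 ∧ v.length = 0
  · rcases h0 with ⟨hu, hv⟩
    rw [List.length_eq_zero_iff] at hu hv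
    subst hu; subst hv
    simp [dotSum]
  · simp only [h0, if_false]
    by_cases hlen : u.length = v.length
    · have hne : ¬ (u.length ≠ v.length) := by omega
      rw [if_neg hne]
      rw [PySem.List.pyRange_zero_natCast, List.foldl_map]
      simp only [PySem.List.pyGetD_natCast]
      rw [PySem.List.foldl_add, zero_add, dotSum_eq_rangeSum u v hlen]
      simp [hlen]
    · simp [hlen]

lemma orthP_comm (vs : List (List Int)) (a b : Nat) : orthP vs a b = orthP vs b a := by
  unfold orthP
  rw [dotSum_comm (vs.getD a []) (vs.getD b [])]
  rw [Bool.beq_comm]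

lemma orthP_iff (vs : List (List Int)) (a b : Nat) :
    orthP vs a b = true
      ↔ ((vs.getD a []).length = (vs.getD b []).length
          ∧ dotSum (vs.getD a []) (vs.getD b []) = 0) := by
  simp [orthP]

lemma mem_extra (vs : List (List Int)) (j k p q : Nat) :
    (([(p : Int), (q : Int)] : List Int) ∈ extraTo vs j k)
      ↔ (q = j ∧ j < p ∧ p < k ∧ orthP vs j p = true) := by
  unfold extraTo
  constructor
  · intro h
    rcases List.mem_map.mp h with ⟨y, hy, heq⟩
    rcases List.mem_filter.mp hy with ⟨hyr, hcond⟩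
    rw [List.mem_range] at hyr
    rw [Bool.and_eq_true, decide_eq_true_eq] at hcond
    have h1 : (y : Int) = (p : Int) ∧ (j : Int) = (q : Int) := by simpa using heq
    have hyp : y = p := by exact_mod_cast h1.1
    have hjq : j = q := by exact_mod_cast h1.2
    subst hyp
    exact ⟨hjq.symm, hcond.1, hyr, hcond.2⟩
  · rintro ⟨hq, hjp, hpk, hP⟩
    subst hq
    exact List.mem_map.mpr ⟨p, List.mem_filter.mpr ⟨List.mem_range.mpr hpk, by simp [hjp, hP]⟩, rfl⟩

lemma mem_usedTo (vs : List (List Int)) (j p q : Nat) :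
    (([(p : Int), (q : Int)] : List Int) ∈ usedTo vs j)
      ↔ (q < j ∧ q < p ∧ p < vs.length ∧ orthP vs q p = true) := by
  induction j with
  | zero => simp [usedTo]
  | succ j ih =>
    rw [usedTo, List.mem_append, ih, mem_extra]
    constructor
    · rintro (⟨h1, h2, h3, h4⟩ | ⟨h1, h2, h3, h4⟩)
      · exact ⟨by omega, h2, h3, h4⟩
      · subst h1
        exact ⟨by omega, h2, h3, h4⟩
    · rintro ⟨h1, h2, h3, h4⟩
      rcases Nat.lt_or_ge q j with h | h
      · exact Or.inl ⟨h, h2, h3, h4⟩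
      · have hq : q = j := by omega
        subst hq
        exact Or.inr ⟨rfl, h2, h3, h4⟩

lemma mem_usedExtra (vs : List (List Int)) (j k p q : Nat) :
    (([(p : Int), (q : Int)] : List Int) ∈ usedTo vs j ++ extraTo vs j k)
      ↔ ((q < j ∧ q < p ∧ p < vs.length ∧ orthP vs q p = true)
        ∨ (q = j ∧ j < p ∧ p < k ∧ orthP vs j p = true)) := by
  rw [List.mem_append, mem_usedTo, mem_extra]

-- evaluating A's inner-loop body at Nat indices, given the used_pairs shape
lemma innerStep_eval (vs : List (List Int)) (j i k : Nat) (hj : j < vs.length) (c : Int) :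
    innerStep vs (j : Int) (c, usedTo vs j ++ extraTo vs j k) (i : Int)
      = (if j < i ∧ k ≤ i ∧ orthP vs j i = true then
          (c + 1, (usedTo vs j ++ extraTo vs j k) ++ [([(i : Int), (j : Int)] : List Int)])
        else (c, usedTo vs j ++ extraTo vs j k)) := by
  unfold innerStep
  simp only [PySem.List.pyGetD_natCast]
  have hslice : ((PySem.List.slice? ([(i : Int), (j : Int)] : List Int) none none (-1)).getD [])
      = ([(j : Int), (i : Int)] : List Int) := by
    simp [PySem.List.slice?, PySem.List.sliceIndices, List.range_succ]
  rw [hslice]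
  simp only [ip_iff, ← orthP_iff]
  by_cases hP : orthP vs i j = true
  · have hPji : orthP vs j i = true := by rw [orthP_comm] at hP; exact hP
    rcases Nat.lt_trichotomy i j with hij | hij | hij
    · -- second visit: [j,i] is already in used_pairs
      have hin : ([(j : Int), (i : Int)] : List Int) ∈ usedTo vs j ++ extraTo vs j k := by
        rw [mem_usedExtra]
        exact Or.inl ⟨hij, hij, hj, hP⟩
      have hno : ¬ (j < i ∧ k ≤ i ∧ orthP vs j i = true) := by
        rintro ⟨h, -, -⟩; omega
      simp [hP, hin, hno]
    · subst hij
      simp [hP]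
    · by_cases hk : k ≤ i
      · -- first visit, not yet processed: count it
        have hni1 : ([(i : Int), (j : Int)] : List Int) ∉ usedTo vs j ++ extraTo vs j k := by
          rw [mem_usedExtra]
          rintro (⟨h, -, -, -⟩ | ⟨-, -, h, -⟩) <;> omega
        have hni2 : ([(j : Int), (i : Int)] : List Int) ∉ usedTo vs j ++ extraTo vs j k := by
          rw [mem_usedExtra]
          rintro (⟨h, -, -, -⟩ | ⟨h, -, -, -⟩) <;> omega
        have hne : (i : Int) ≠ (j : Int) := by
          have : i ≠ j := by omega
          exact_mod_cast this
        simp [hP, hni1, hni2, hne, hij, hk, hPji]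
      · -- already appended earlier in this round
        have hin : ([(i : Int), (j : Int)] : List Int) ∈ usedTo vs j ++ extraTo vs j k := by
          rw [mem_usedExtra]
          exact Or.inr ⟨rfl, hij, by omega, hPji⟩
        have hno : ¬ (j < i ∧ k ≤ i ∧ orthP vs j i = true) := by
          rintro ⟨-, h, -⟩; omega
        simp [hin, hno]
  · have hPji : ¬ orthP vs j i = true := by rw [orthP_comm]; exact hP
    have hno : ¬ (j < i ∧ k ≤ i ∧ orthP vs j i = true) := by
      rintro ⟨-, -, h⟩; exact hPji h
    simp [hP, hno]

lemma extra_succ (vs : List (List Int)) (j k : Nat) (h : orthP vs j k = true) (hjk : j < k) :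
    extraTo vs j k ++ [([(k : Int), (j : Int)] : List Int)] = extraTo vs j (k + 1) := by
  simp [extraTo, List.range_succ, List.filter_append, hjk, h]

lemma extra_succ_no (vs : List (List Int)) (j k : Nat) (h : ¬ (j < k ∧ orthP vs j k = true)) :
    extraTo vs j k = extraTo vs j (k + 1) := by
  have hf : (decide (j < k) && orthP vs j k) = false := by
    rcases Nat.lt_or_ge j k with hlt | hge
    · by_cases hP : orthP vs j k = true
      · exact absurd ⟨hlt, hP⟩ h
      · simp [hlt]
        simpa using hP
    · simp [Nat.not_lt_of_ge hge]
  simp [extraTo, List.range_succ, List.filter_append, hf]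

lemma countP_range_succ (j k : Nat) (vs : List (List Int)) :
    (List.range (k + 1)).countP (fun y => decide (j < y) && orthP vs j y)
      = (List.range k).countP (fun y => decide (j < y) && orthP vs j y)
        + (if j < k ∧ orthP vs j k = true then 1 else 0) := by
  rw [List.range_succ, List.countP_append]
  congr 1
  by_cases hc : j < k ∧ orthP vs j k = true
  · simp [hc.1, hc.2]
  · rw [if_neg hc]
    rcases Nat.lt_or_ge j k with hlt | hge
    · have : orthP vs j k ≠ true := fun hP => hc ⟨hlt, hP⟩
      simp [this]
    · simp [Nat.not_lt_of_ge hge]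

-- A's inner loop over the first k indices, within outer round j
lemma innerA (vs : List (List Int)) (j : Nat) (hj : j < vs.length) (c : Int) (k : Nat)
    (hk : k ≤ vs.length) :
    (List.range k).foldl (fun st (i : Nat) => innerStep vs (j : Int) st (i : Int)) (c, usedTo vs j)
      = (c + ((List.range k).countP (fun y => decide (j < y) && orthP vs j y) : Int),
          usedTo vs j ++ extraTo vs j k) := by
  induction k with
  | zero => simp [extraTo]
  | succ k ih =>
    have hk' : k ≤ vs.length := by omega
    rw [countP_range_succ, List.range_succ, List.foldl_append, ih hk']
    simp only [List.foldl_cons, List.foldl_nil]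
    rw [innerStep_eval vs j k k hj _]
    by_cases hcase : j < k ∧ orthP vs j k = true
    · have hcond : j < k ∧ k ≤ k ∧ orthP vs j k = true := ⟨hcase.1, le_refl k, hcase.2⟩
      rw [if_pos hcond, if_pos hcase]
      rw [List.append_assoc, extra_succ vs j k hcase.2 hcase.1]
      rw [Prod.mk.injEq]
      refine ⟨by push_cast; ring, rfl⟩
    · have hcond : ¬ (j < k ∧ k ≤ k ∧ orthP vs j k = true) := by
        rintro ⟨h1, -, h3⟩; exact hcase ⟨h1, h3⟩
      rw [if_neg hcond, if_neg hcase, ← extra_succ_no vs j k hcase]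
      simp

-- A's outer loop over the first j rounds
lemma outerA (vs : List (List Int)) (j : Nat) (hj : j ≤ vs.length) :
    (List.range j).foldl
      (fun st (x : Nat) => (List.range vs.length).foldl
        (fun st (i : Nat) => innerStep vs (x : Int) st (i : Int)) st)
      ((0 : Int), ([] : List (List Int)))
      = ((List.range j).foldl
          (fun c x => c + ((List.range vs.length).countP
            (fun y => decide (x < y) && orthP vs x y) : Int)) 0,
        usedTo vs j) := by
  induction j with
  | zero => simp [usedTo]
  | succ j ih =>
    have hj' : j ≤ vs.length := by omega
    rw [List.range_succ, List.foldl_append, List.foldl_append, ih hj']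
    simp only [List.foldl_cons, List.foldl_nil]
    have h0 : usedTo vs j = usedTo vs j ++ extraTo vs j 0 := by simp [extraTo]
    rw [show ((List.foldl (fun c x => c + ((List.range vs.length).countP
        (fun y => decide (x < y) && orthP vs x y) : Int)) 0 (List.range j)),
        usedTo vs j) = ((List.foldl (fun c x => c + ((List.range vs.length).countP
        (fun y => decide (x < y) && orthP vs x y) : Int)) 0 (List.range j)),
        usedTo vs j) from rfl]
    rw [innerA vs j (by omega) _ vs.length (le_refl _)]
    rfl

lemma pyRange_cast_nil (a b : Nat) (h : b ≤ a) :
    PySem.List.pyRange (a : Int) (b : Int) = [] := by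
  rcases hP : PySem.List.pyRange (a : Int) (b : Int) with _ | ⟨x, xs⟩
  · rfl
  · exfalso
    have hx : x ∈ PySem.List.pyRange (a : Int) (b : Int) := by
      rw [hP]; exact List.mem_cons_self
    rw [PySem.List.mem_pyRange_one] at hx
    have hba : (b : Int) ≤ (a : Int) := by exact_mod_cast h
    omega

lemma pyRange_natCast_filter (a b : Nat) :
    PySem.List.pyRange (a : Int) (b : Int)
      = ((List.range b).filter (fun y => decide (a ≤ y))).map (fun (k : Nat) => (k : Int)) := by
  induction b with
  | zero =>
    rw [pyRange_cast_nil a 0 (Nat.zero_le a)]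
    simp
  | succ b ih =>
    rw [List.range_succ, List.filter_append]
    by_cases hab : a ≤ b
    · have hle : (a : Int) ≤ (b : Int) := by exact_mod_cast hab
      rw [show ((b + 1 : Nat) : Int) = (b : Int) + 1 by push_cast; ring]
      rw [PySem.List.pyRange_one_succ_right hle, ih]
      simp [hab]
    · have h1 : b + 1 ≤ a := Nat.succ_le_of_lt (Nat.lt_of_not_le hab)
      rw [pyRange_cast_nil a (b + 1) h1, pyRange_cast_nil a b (by omega)] at *
      have hmt : (List.range b).filter (fun y => decide (a ≤ y)) = [] := by
        rcases hQ : (List.range b).filter (fun y => decide (a ≤ y)) with _ | ⟨z, zs⟩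
        · rfl
        · exfalso
          have : z ∈ (List.range b).filter (fun y => decide (a ≤ y)) := by
            rw [hQ]; exact List.mem_cons_self
          rcases List.mem_filter.mp this with ⟨hz1, hz2⟩
          rw [List.mem_range] at hz1
          rw [decide_eq_true_eq] at hz2
          omega
      simp [hmt, hab]

-- B's value as the same Nat-indexed sum
lemma altB (vs : List (List Int)) :
    num_of_orthogonal_alt vs
      = (List.range vs.length).foldl
          (fun c x => c + ((List.range vs.length).countP
            (fun y => decide (x < y) && orthP vs x y) : Int)) 0 := by
  unfold num_of_orthogonal_alt
  rw [PySem.List.pyRange_zero_natCast, List.foldl_map]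
  apply PySem.List.foldl_congr_mem
  intro acc x _
  simp only [PySem.List.pyGetD_natCast]
  rw [show ((x : Int) + 1) = ((x + 1 : Nat) : Int) by push_cast; ring]
  rw [pyRange_natCast_filter (x + 1) vs.length, List.foldl_map]
  have hfold : ((List.range vs.length).filter (fun y => decide (x + 1 ≤ y))).foldl
      (fun cnt (y : Nat) => if (vs.getD x []).length = (PySem.List.pyGetD vs (y : Int) []).length ∧
          dotSum (vs.getD x []) (PySem.List.pyGetD vs (y : Int) []) = 0 then cnt + 1 else cnt) acc
      = acc + (((List.range vs.length).filter (fun y => decide (x + 1 ≤ y))).countP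
          (fun y => orthP vs x y) : Int) := by
    rw [← PySem.List.foldl_count_if (fun y => orthP vs x y)]
    apply PySem.List.foldl_congr_mem
    intro c y _
    simp only [PySem.List.pyGetD_natCast]
    by_cases hP : orthP vs x y = true
    · have hc : ((vs.getD x []).length = (vs.getD y []).length ∧
          dotSum (vs.getD x []) (vs.getD y []) = 0) := (orthP_iff vs x y).mp hP
      simp only [List.getD] at hc
      simp [hc, hP]
    · have hc : ¬ ((vs.getD x []).length = (vs.getD y []).length ∧
          dotSum (vs.getD x []) (vs.getD y []) = 0) := fun h => hP ((orthP_iff vs x y).mpr h)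
      simp only [List.getD] at hc
      simp [hc, hP]
  rw [hfold, List.countP_filter]
  congr 2
  apply List.countP_congr
  intro y _
  constructor
  · intro h
    rw [Bool.and_eq_true, decide_eq_true_eq] at h ⊢
    refine ⟨by omega, h.1⟩
  · intro h
    rw [Bool.and_eq_true, decide_eq_true_eq] at h ⊢
    refine ⟨h.2, by omega⟩

-- ===== VERDICT (by name: the statement is the Claim_ definition above) =====
theorem num_of_orthogonal_spec : Claim_equal_num_of_orthogonal := by
  intro vs _
  unfold Spec_num_of_orthogonal
  unfold num_of_orthogonal
  rw [PySem.List.pyRange_zero_natCast]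
  simp only [List.foldl_map]
  rw [outerA vs vs.length (le_refl _), altB vs]
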